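-- pv_equiv track=rewrite | github.com/oluizbrito/n8n-teste | observatorio_banda_larga_fixa/scripts/ingest.py | best_csv_resource
-- ===== SOURCE A (Python) =====
-- def best_csv_resource(pkg):
--     csvs = [r for r in pkg.get("resources", []) if (r.get("format") or "").lower() == "csv"]
--     if not csvs:
--         csvs = [r for r in pkg.get("resources", []) if "csv" in (r.get("mimetype") or "").lower() or "csv" in (r.get("name") or "").lower()]
--     if not csvs:
--         raise RuntimeError("Nenhum recurso CSV encontrado no pacote")
--     def sortkey(r):
--         return r.get("last_modified") or r.get("created") or ""
--     csvs.sort(key=sortkey, reverse=True)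
--     return csvs[0]
-- ===== SOURCE B (Python) =====
-- def best_csv_resource(pkg):
--     best_fmt = best_fb = None
--     key_fmt = key_fb = ""
--     for r in pkg.get("resources", []):
--         k = r.get("last_modified") or r.get("created") or ""
--         if (r.get("format") or "").lower() == "csv":
--             if best_fmt is None or key_fmt < k:
--                 best_fmt, key_fmt = r, k
--         elif "csv" in (r.get("mimetype") or "").lower() or "csv" in (r.get("name") or "").lower():
--             if best_fb is None or key_fb < k:
--                 best_fb, key_fb = r, k
--     if best_fmt is not None:
--         return best_fmt
--     if best_fb is not None:
--         return best_fb
--     raise RuntimeError("Nenhum recurso CSV encontrado no pacote")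
-- ===== Notes on version B (the rewrite author's own statement) =====
-- stated objective: alternative
-- what changed: Replaces A's two filter passes followed by a full stable reverse sort (taking element 0) with a single left-to-right fold that keeps the running best format=='csv' resource and the running best fallback resource, improving only on a strictly greater key so ties keep the earliest element exactly as A's stable sort does.
import Mathlib
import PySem

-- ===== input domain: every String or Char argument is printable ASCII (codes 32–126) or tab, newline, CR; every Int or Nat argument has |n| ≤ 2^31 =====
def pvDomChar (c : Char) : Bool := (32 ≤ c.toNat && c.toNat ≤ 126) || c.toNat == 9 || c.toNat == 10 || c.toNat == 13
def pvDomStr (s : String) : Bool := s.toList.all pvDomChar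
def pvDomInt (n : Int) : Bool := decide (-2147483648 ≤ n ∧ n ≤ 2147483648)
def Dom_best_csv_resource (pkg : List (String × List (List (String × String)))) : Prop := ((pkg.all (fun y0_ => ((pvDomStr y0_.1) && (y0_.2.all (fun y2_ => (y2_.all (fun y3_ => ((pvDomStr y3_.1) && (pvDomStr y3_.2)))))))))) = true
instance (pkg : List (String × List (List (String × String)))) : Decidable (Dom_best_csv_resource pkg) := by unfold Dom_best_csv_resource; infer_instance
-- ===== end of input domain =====

-- B replaces A's two filter passes plus a full reverse sort by ONE left-to-right pass that keeps
-- the current best format=="csv" resource and the current best fallback resource (strict improvement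
-- only, so ties keep the earliest, exactly like A's stable reverse sort): objective = alternative.

-- shared helpers (both Pythons compute these same sub-expressions)
-- r.get(k) or ""  (missing key and empty string both give "")
def pvGet (r : List (String × String)) (k : String) : String :=
  (PySem.Dict.get? ⟨r⟩ k).getD ""

-- r.get("last_modified") or r.get("created") or ""
def pvKey (r : List (String × String)) : String :=
  let lm := pvGet r "last_modified"
  if lm = "" then pvGet r "created" else lm

-- (r.get("format") or "").lower() == "csv"
def pvIsCsvFmt (r : List (String × String)) : Bool :=
  PySem.Str.lower (pvGet r "format") == "csv"

-- "csv" in (r.get("mimetype") or "").lower() or "csv" in (r.get("name") or "").lower()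
def pvIsCsvLike (r : List (String × String)) : Bool :=
  PySem.Str.isIn "csv" (PySem.Str.lower (pvGet r "mimetype")) ||
  PySem.Str.isIn "csv" (PySem.Str.lower (pvGet r "name"))

-- ===== PORT A =====
-- filter, fallback filter, stable reverse sort by key, take the first element
def best_csv_resource (pkg : List (String × List (List (String × String)))) : List (String × String) :=
  let resources := PySem.Dict.getD ⟨pkg⟩ "resources" []
  let csvs := resources.filter pvIsCsvFmt
  let csvs := if csvs = [] then resources.filter pvIsCsvLike else csvs
  -- csvs = [] means the Python raised RuntimeError; excluded by Pre_
  match PySem.List.sorted csvs pvKey true with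
  | r :: _ => r
  | [] => []

-- ===== PORT B =====
-- one pass: state = (best format-csv resource, its key, best fallback resource, its key)
def best_csv_resource_alt (pkg : List (String × List (List (String × String)))) : List (String × String) :=
  let resources := PySem.Dict.getD ⟨pkg⟩ "resources" []
  let st := resources.foldl
    (fun (st : (Option (List (String × String)) × String) × (Option (List (String × String)) × String)) r =>
      let k := pvKey r
      if pvIsCsvFmt r then
        if st.1.1.isNone || st.1.2 < k then ((some r, k), st.2) else st
      else if pvIsCsvLike r then
        if st.2.1.isNone || st.2.2 < k then (st.1, (some r, k)) else st
      else st)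
    ((none, ""), (none, ""))
  match st.1.1 with
  | some r => r
  | none =>
    match st.2.1 with
    | some r => r
    | none => []   -- the Python raises RuntimeError here; excluded by Pre_

-- ===== PRECONDITION & SPEC =====
-- Pre_ excludes exactly the packages with no CSV-looking resource, on which A raises RuntimeError.
def Pre_best_csv_resource (pkg : List (String × List (List (String × String)))) : Prop :=
  ∃ r ∈ PySem.Dict.getD ⟨pkg⟩ "resources" [], pvIsCsvFmt r = true ∨ pvIsCsvLike r = true
instance (pkg : List (String × List (List (String × String)))) : Decidable (Pre_best_csv_resource pkg) := by
  unfold Pre_best_csv_resource; infer_instance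

def pvWitness_best_csv_resource : (List (String × List (List (String × String)))) :=
  [("resources", [[("format", "CSV"), ("last_modified", "2021-01-01")]])]

def Spec_best_csv_resource (pkg : List (String × List (List (String × String)))) (out : List (String × String)) : Prop := out = best_csv_resource_alt pkg
instance (pkg : List (String × List (List (String × String)))) (out : List (String × String)) : Decidable (Spec_best_csv_resource pkg out) := by unfold Spec_best_csv_resource; infer_instance

-- ===== CLAIM (what is proved, stated in full; the proofs are below) =====
def Claim_equal_best_csv_resource : Prop := ∀ (pkg : List (String × List (List (String × String)))), Dom_best_csv_resource pkg → Pre_best_csv_resource pkg → Spec_best_csv_resource pkg (best_csv_resource pkg)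

-- ===== LEMMAS AND PROOFS =====

-- the "running champion" both programs compute: first element of maximal pvKey
def pvChamp (b : List (String × String)) (t : List (List (String × String))) : List (String × String) :=
  t.foldl (fun b r => if pvKey b < pvKey r then r else b) b

theorem pvChamp_cons (b x : List (String × String)) (t : List (List (String × String))) :
    pvChamp b (x :: t) = pvChamp (if pvKey b < pvKey x then x else b) t := by
  simp [pvChamp, List.foldl]

-- head of A's insertion fold = the champion
theorem head_foldl_insertBy (t : List (List (String × String)))
    (acc : List (List (String × String))) (b : List (String × String))
    (h : acc.head? = some b) :
    (t.foldl (fun acc x => PySem.List.insertBy (fun a b => decide (pvKey b < pvKey a)) x acc) acc).head?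
      = some (pvChamp b t) := by
  induction t generalizing acc b with
  | nil => simpa [pvChamp] using h
  | cons x t ih =>
    cases acc with
    | nil => simp at h
    | cons y ys =>
      have hb : b = y := by simpa using h.symm
      subst hb
      rw [pvChamp_cons]
      by_cases hlt : pvKey b < pvKey x
      · simpa [List.foldl, PySem.List.insertBy, hlt] using
          ih (x :: b :: ys) x (by simp)
      · simpa [List.foldl, PySem.List.insertBy, hlt] using
          ih (b :: PySem.List.insertBy (fun a b => decide (pvKey b < pvKey a)) x ys) b (by simp)

theorem head_sorted_rev (x : List (String × String)) (t : List (List (String × String))) :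
    (PySem.List.sorted (x :: t) pvKey true).head? = some (pvChamp x t) := by
  rw [PySem.List.sorted_rev_eq_foldl_insertBy]
  exact head_foldl_insertBy t [x] x (by simp)

-- B's single-slot fold = the champion
def pvStep (s : Option (List (String × String)) × String) (r : List (String × String)) :
    Option (List (String × String)) × String :=
  if s.1.isNone || s.2 < pvKey r then (some r, pvKey r) else s

theorem foldl_pvStep_some (t : List (List (String × String))) (b : List (String × String)) :
    t.foldl pvStep (some b, pvKey b) = (some (pvChamp b t), pvKey (pvChamp b t)) := by
  induction t generalizing b with
  | nil => simp [pvChamp]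
  | cons x t ih =>
    rw [pvChamp_cons]
    by_cases hlt : pvKey b < pvKey x
    · simpa [List.foldl, pvStep, hlt] using ih x
    · simpa [List.foldl, pvStep, hlt] using ih b

-- B's combined fold is the product of two independent pvStep folds over the two filtered lists
def pvStep2 (st : (Option (List (String × String)) × String) × (Option (List (String × String)) × String))
    (r : List (String × String)) :
    (Option (List (String × String)) × String) × (Option (List (String × String)) × String) :=
  (if pvIsCsvFmt r then pvStep st.1 r else st.1,
   if !pvIsCsvFmt r && pvIsCsvLike r then pvStep st.2 r else st.2)

theorem step_eq :
    (fun (st : (Option (List (String × String)) × String) × (Option (List (String × String)) × String)) r =>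
      let k := pvKey r
      if pvIsCsvFmt r then
        if st.1.1.isNone || st.1.2 < k then ((some r, k), st.2) else st
      else if pvIsCsvLike r then
        if st.2.1.isNone || st.2.2 < k then (st.1, (some r, k)) else st
      else st) = pvStep2 := by
  funext st r
  rcases st with ⟨s1, s2⟩
  by_cases hf : pvIsCsvFmt r <;> by_cases hl : pvIsCsvLike r <;>
    simp [pvStep2, pvStep, hf, hl] <;> split_ifs <;> rfl

theorem foldl_pvStep2 (xs : List (List (String × String)))
    (s1 s2 : Option (List (String × String)) × String) :
    xs.foldl pvStep2 (s1, s2)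
      = ((xs.filter pvIsCsvFmt).foldl pvStep s1,
         (xs.filter (fun r => !pvIsCsvFmt r && pvIsCsvLike r)).foldl pvStep s2) := by
  induction xs generalizing s1 s2 with
  | nil => simp
  | cons x t ih =>
    by_cases hf : pvIsCsvFmt x <;> by_cases hl : pvIsCsvLike x <;>
      simp [List.foldl_cons, pvStep2, hf, hl, ih]

-- ===== VERDICT (by name: the statement is the Claim_ definition above) =====
theorem best_csv_resource_spec : Claim_equal_best_csv_resource := by
  intro pkg _ hpre
  unfold Spec_best_csv_resource best_csv_resource best_csv_resource_alt
  rw [step_eq]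
  set resources := PySem.Dict.getD ⟨pkg⟩ "resources" [] with hres
  simp only [foldl_pvStep2]
  rcases hfil : resources.filter pvIsCsvFmt with _ | ⟨c, cs⟩
  · -- no resource has format "csv": fallback filter is used
    have hnone : ∀ r ∈ resources, pvIsCsvFmt r = false := by
      intro r hr
      by_contra hne
      have : r ∈ resources.filter pvIsCsvFmt :=
        List.mem_filter.mpr ⟨hr, by simpa using hne⟩
      simp [hfil] at this
    have hfeq : resources.filter (fun r => !pvIsCsvFmt r && pvIsCsvLike r)
        = resources.filter pvIsCsvLike := by
      apply List.filter_congr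
      intro r hr; simp [hnone r hr]
    rcases hlik : resources.filter pvIsCsvLike with _ | ⟨d, ds⟩
    · -- contradicts Pre_
      exfalso
      obtain ⟨r, hr, hor⟩ := hpre
      rcases hor with h | h
      · exact absurd (hnone r hr) (by simp [h])
      · have : r ∈ resources.filter pvIsCsvLike :=
          List.mem_filter.mpr ⟨hr, by simpa using h⟩
        simp [hlik] at this
    · have hh := head_sorted_rev d ds
      rcases hs : PySem.List.sorted (d :: ds) pvKey true with _ | ⟨m, ms⟩
      · simp [hs] at hh
      · rw [hs] at hh
        simp only [List.head?] at hh
        obtain rfl : m = pvChamp d ds := Option.some.inj hh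
        simp [hs, hfeq, hlik, pvStep, foldl_pvStep_some]
  · -- at least one resource has format "csv"
    have hh := head_sorted_rev c cs
    rcases hs : PySem.List.sorted (c :: cs) pvKey true with _ | ⟨m, ms⟩
    · simp [hs] at hh
    · rw [hs] at hh
      simp only [List.head?] at hh
      obtain rfl : m = pvChamp c cs := Option.some.inj hh
      simp [hs, pvStep, foldl_pvStep_some]
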